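-- pv_equiv track=rewrite | github.com/Sevastopol12/scheduling_upm | scheduling_upm/utils/evaluation.py | total_penalty_on_violation
-- ===== SOURCE A (Python) =====
-- from typing import List, Tuple, Dict, Any
--
-- def total_penalty_on_violation(events_log: Dict[int, int], energy_cap: int) -> int:
--     """Penalize exceeded usages"""
--     # List of events start time
--     sorted_event_start_times: list[int] = sorted(events_log.keys())
--     current_usages: int = 0
--     exceeds_penalty: int = 0
--
--     for idx in range(len(sorted_event_start_times)):
--         start_time: int = sorted_event_start_times[idx]
--         end_time: int = (
--             sorted_event_start_times[idx + 1]
--             if idx + 1 < len(sorted_event_start_times)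
--             else start_time
--         )
--         current_usages += events_log[start_time]
--
--         # Penalize per unit exceeds * duration
--         if current_usages > energy_cap:
--             duration: int = end_time - start_time
--             penalty_per_unit_time: int = current_usages - energy_cap
--             exceeds_penalty += penalty_per_unit_time * duration
--
--     return exceeds_penalty
-- ===== SOURCE B (Python) =====
-- def _cum_le(events_log, t):
--     """Total usage over all events starting no later than t."""
--     return sum(u for t2, u in events_log.items() if t2 <= t)
--
-- def _next_after(events_log, t):
--     """Earliest event time strictly after t, or t itself if there is none."""
--     return min((t2 for t2 in events_log if t2 > t), default=t)
--
-- def total_penalty_on_violation(events_log, energy_cap):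
--     """Per-event formulation, no sorting: each event time contributes
--     max(0, cumulative usage at that time - cap) * (gap to the next event time),
--     with the cumulative usage and the next time recomputed by direct scans."""
--     penalty = 0
--     for t in events_log:
--         cum = _cum_le(events_log, t)
--         if cum > energy_cap:
--             penalty += (cum - energy_cap) * (_next_after(events_log, t) - t)
--     return penalty
-- ===== Notes on version B (the rewrite author's own statement) =====
-- stated objective: alternative
-- what changed: Replaces A's sort-then-single-sweep with a running accumulator by a sortless per-event formulation: for each event time, recompute the cumulative usage by a direct scan over all items with key <= t and find the next event time with min over keys > t, summing the independent contributions; no sorted order and no carried state.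
import Mathlib
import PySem

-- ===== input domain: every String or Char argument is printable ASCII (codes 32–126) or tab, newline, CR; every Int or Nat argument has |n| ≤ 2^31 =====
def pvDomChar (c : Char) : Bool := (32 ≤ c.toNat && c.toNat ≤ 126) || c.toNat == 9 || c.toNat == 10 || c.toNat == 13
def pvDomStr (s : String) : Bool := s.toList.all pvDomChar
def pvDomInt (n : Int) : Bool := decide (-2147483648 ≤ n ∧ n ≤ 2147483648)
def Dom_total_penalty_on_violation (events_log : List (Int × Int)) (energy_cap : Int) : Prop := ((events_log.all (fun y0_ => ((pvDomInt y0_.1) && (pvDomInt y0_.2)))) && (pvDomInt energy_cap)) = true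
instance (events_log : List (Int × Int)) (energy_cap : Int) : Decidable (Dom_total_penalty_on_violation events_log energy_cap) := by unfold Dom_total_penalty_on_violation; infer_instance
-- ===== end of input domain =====

-- B drops A's sort-then-sweep: each event time contributes independently, with its cumulative
-- usage and the next event time recomputed by direct scans over the dict (alternative decomposition, not faster).

-- ===== PORT A =====
def total_penalty_on_violation (events_log : List (Int × Int)) (energy_cap : Int) : Int :=
  let d := PySem.Dict.ofList events_log
  let sorted_event_start_times := PySem.List.sorted d.keys (fun k => k) false
  let res := (PySem.List.pyRange 0 (sorted_event_start_times.length : Int) 1).foldl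
    (fun (st : Int × Int) idx =>
      let start_time := PySem.List.pyGetD sorted_event_start_times idx 0
      let end_time := if idx + 1 < (sorted_event_start_times.length : Int)
        then PySem.List.pyGetD sorted_event_start_times (idx + 1) 0
        else start_time
      let current_usages := st.1 + d.getD start_time 0
      if current_usages > energy_cap then
        (current_usages, st.2 + (current_usages - energy_cap) * (end_time - start_time))
      else (current_usages, st.2))
    (0, 0)
  res.2

-- ===== PORT B =====
def pvCumLE (d : PySem.Dict Int Int) (t : Int) : Int :=
  (d.items.filter (fun kv => kv.1 ≤ t)).foldl (fun s kv => s + kv.2) 0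

def pvNextAfter (d : PySem.Dict Int Int) (t : Int) : Int :=
  match PySem.List.min? (d.keys.filter (fun k => k > t)) (fun x => x) with
  | some m => m
  | none => t

def total_penalty_on_violation_alt (events_log : List (Int × Int)) (energy_cap : Int) : Int :=
  let d := PySem.Dict.ofList events_log
  d.keys.foldl (fun penalty t =>
    let cum := pvCumLE d t
    if cum > energy_cap then penalty + (cum - energy_cap) * (pvNextAfter d t - t)
    else penalty) 0

-- ===== PRECONDITION & SPEC =====
def Spec_total_penalty_on_violation (events_log : List (Int × Int)) (energy_cap : Int) (out : Int) : Prop := out = total_penalty_on_violation_alt events_log energy_cap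
instance (events_log : List (Int × Int)) (energy_cap : Int) (out : Int) : Decidable (Spec_total_penalty_on_violation events_log energy_cap out) := by unfold Spec_total_penalty_on_violation; infer_instance

-- ===== CLAIM (what is proved, stated in full; the proofs are below) =====
def Claim_equal_total_penalty_on_violation : Prop := ∀ (events_log : List (Int × Int)) (energy_cap : Int), Dom_total_penalty_on_violation events_log energy_cap → Spec_total_penalty_on_violation events_log energy_cap (total_penalty_on_violation events_log energy_cap)

-- ===== LEMMAS AND PROOFS =====

def pvNext (t : Int) : List Int → Int
  | [] => t
  | t' :: _ => t'

def pvLoop (u : Int → Int) (cap : Int) : List Int → Int × Int → Int × Int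
  | [], st => st
  | t :: rest, st =>
    let c := st.1 + u t
    let e := pvNext t rest
    pvLoop u cap rest (c, if c > cap then st.2 + (c - cap) * (e - t) else st.2)

-- the "mathematical" per-event quantities over a plain key list
def pvS (u : Int → Int) (full : List Int) (t : Int) : Int :=
  ((full.filter (fun k => k ≤ t)).map u).sum

def pvN (full : List Int) (t : Int) : Int :=
  match PySem.List.min? (full.filter (fun k => k > t)) (fun x => x) with
  | some m => m
  | none => t

def pvG (u : Int → Int) (cap : Int) (full : List Int) (t : Int) : Int :=
  if pvS u full t > cap then (pvS u full t - cap) * (pvN full t - t) else 0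

theorem pvA_eq_loop (u : Int → Int) (cap : Int) (L : List Int) (st : Int × Int) :
    (PySem.List.pyRange 0 (L.length : Int) 1).foldl
      (fun (st : Int × Int) idx =>
        let t := PySem.List.pyGetD L idx 0
        let e := if idx + 1 < (L.length : Int) then PySem.List.pyGetD L (idx + 1) 0 else t
        let c := st.1 + u t
        if c > cap then (c, st.2 + (c - cap) * (e - t)) else (c, st.2)) st
    = pvLoop u cap L st := by
  induction L generalizing st with
  | nil => simp [pvLoop, PySem.List.pyRange_one_eq_nil]
  | cons t rest ih =>
    rw [PySem.List.pyRange_one_cons (by simp)]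
    simp only [List.foldl_cons, zero_add]
    have hshift : PySem.List.pyRange 1 ((t :: rest).length : Int) 1
        = (PySem.List.pyRange 0 (rest.length : Int) 1).map (fun k => 1 + k) := by
      simp [PySem.List.pyRange_one, List.map_map, Function.comp]
    rw [hshift, List.foldl_map]
    have hR : pvLoop u cap (t :: rest) st
        = pvLoop u cap rest (st.1 + u t,
            if st.1 + u t > cap then
              st.2 + (st.1 + u t - cap) * (pvNext t rest - t)
            else st.2) := rfl
    rw [hR, ← ih]
    have hinit : (if st.1 + u (PySem.List.pyGetD (t :: rest) 0 0) > cap then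
        (st.1 + u (PySem.List.pyGetD (t :: rest) 0 0),
          st.2 + (st.1 + u (PySem.List.pyGetD (t :: rest) 0 0) - cap) *
            ((if (1 : Int) < ((t :: rest).length : Int) then PySem.List.pyGetD (t :: rest) 1 0
              else PySem.List.pyGetD (t :: rest) 0 0) - PySem.List.pyGetD (t :: rest) 0 0))
        else (st.1 + u (PySem.List.pyGetD (t :: rest) 0 0), st.2))
        = (st.1 + u t,
            if st.1 + u t > cap then
              st.2 + (st.1 + u t - cap) * (pvNext t rest - t)
            else st.2) := by
      cases rest with
      | nil => simp [PySem.List.pyGetD_zero_cons, pvNext]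
      | cons t' rs =>
        have h1 : ((1 : Int) < ((t :: t' :: rs).length : Int)) := by simp
        have h2 : PySem.List.pyGetD (t :: t' :: rs) 1 0 = t' := by
          simpa using PySem.List.pyGetD_natCast (t :: t' :: rs) 1 0
        simp only [PySem.List.pyGetD_zero_cons, if_pos h1, h2, pvNext]
        split <;> rfl
    rw [hinit]
    apply List.foldl_ext
    intro acc k hk
    rw [PySem.List.mem_pyRange_one] at hk
    obtain ⟨m, rfl⟩ : ∃ m : Nat, k = (m : Int) := ⟨k.toNat, by omega⟩
    have g1 : PySem.List.pyGetD (t :: rest) (1 + (m : Int)) 0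
        = PySem.List.pyGetD rest (m : Int) 0 := by
      have h1 : 1 + (m : Int) = ((m + 1 : Nat) : Int) := by push_cast; ring
      rw [h1, PySem.List.pyGetD_natCast, PySem.List.pyGetD_natCast]
      exact List.getD_cons_succ
    have g2 : PySem.List.pyGetD (t :: rest) (1 + (m : Int) + 1) 0
        = PySem.List.pyGetD rest ((m : Int) + 1) 0 := by
      have h1 : 1 + (m : Int) + 1 = ((m + 2 : Nat) : Int) := by push_cast; ring
      have h2 : (m : Int) + 1 = ((m + 1 : Nat) : Int) := by push_cast; ring
      rw [h1, h2, PySem.List.pyGetD_natCast, PySem.List.pyGetD_natCast]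
      exact List.getD_cons_succ
    by_cases h : (m : Int) + 1 < (rest.length : Int)
    · have h' : 1 + (m : Int) + 1 < (((t :: rest).length : Nat) : Int) := by
        simp only [List.length_cons]; push_cast; omega
      simp only [if_pos h, if_pos h', g1, g2]
    · have h' : ¬ (1 + (m : Int) + 1 < (((t :: rest).length : Nat) : Int)) := by
        simp only [List.length_cons]; push_cast; omega
      simp only [if_neg h, if_neg h', g1]

theorem pvFoldlAdd (g : Int → Int) (l : List Int) (pen : Int) :
    l.foldl (fun pen t => pen + g t) pen = pen + (l.map g).sum := by
  induction l generalizing pen with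
  | nil => simp
  | cons t rest ih => simp [ih]; ring

theorem pvFoldlSnd (l : List (Int × Int)) (s : Int) :
    l.foldl (fun s kv => s + kv.2) s = s + (l.map (fun kv => kv.2)).sum := by
  induction l generalizing s with
  | nil => simp
  | cons kv rest ih => simp [ih]; ring

theorem pvFoldlMin (rs : List Int) (r : Int) (h : ∀ x ∈ rs, r ≤ x) :
    rs.foldl min r = r := by
  induction rs with
  | nil => rfl
  | cons x xs ih =>
    simp only [List.foldl_cons, min_eq_left (h x (by simp))]
    exact ih (fun y hy => h y (by simp [hy]))

theorem pvMinPerm (l l' : List Int) (h : l.Perm l') :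
    PySem.List.min? l (fun x => x) = PySem.List.min? l' (fun x => x) := by
  cases hm : PySem.List.min? l (fun x => x) with
  | none =>
    have hl : l = [] := (PySem.List.min?_eq_none_iff l (fun x => x)).mp hm
    subst hl
    have hl' : l' = [] := h.nil_eq.symm
    subst hl'
    exact ((PySem.List.min?_eq_none_iff ([] : List Int) (fun x => x)).mpr rfl).symm
  | some m =>
    cases hm' : PySem.List.min? l' (fun x => x) with
    | none =>
      have hl' : l' = [] := (PySem.List.min?_eq_none_iff l' (fun x => x)).mp hm'
      subst hl'
      have hl : l = [] := h.eq_nil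
      subst hl
      rw [(PySem.List.min?_eq_none_iff ([] : List Int) (fun x => x)).mpr rfl] at hm
      exact absurd hm (by simp)
    | some m' =>
      have hmem : m ∈ l := PySem.List.min?_mem hm
      have hmem' : m' ∈ l' := PySem.List.min?_mem hm'
      have h1 : m ≤ m' := PySem.List.min?_isMin hm m' (h.mem_iff.mpr hmem')
      have h2 : m' ≤ m := PySem.List.min?_isMin hm' m (h.mem_iff.mp hmem)
      exact congrArg some (le_antisymm h1 h2)

theorem pvCumLE_eq (d : PySem.Dict Int Int) (hnd : d.keys.Nodup) (ts : List Int)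
    (hperm : d.keys.Perm ts) (t : Int) :
    pvCumLE d t = pvS (fun k => d.getD k 0) ts t := by
  unfold pvCumLE pvS
  rw [PySem.Dict.items_eq_map_keys d hnd 0, List.filter_map, pvFoldlSnd]
  simp only [zero_add, List.map_map]
  have hp : (d.keys.filter (fun k => decide (k ≤ t))).Perm (ts.filter (fun k => decide (k ≤ t))) :=
    hperm.filter _
  have := (hp.map ((fun kv : Int × Int => kv.2) ∘ fun k => (k, d.getD k 0))).sum_eq
  simpa [Function.comp] using this

theorem pvNextAfter_eq (d : PySem.Dict Int Int) (ts : List Int)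
    (hperm : d.keys.Perm ts) (t : Int) :
    pvNextAfter d t = pvN ts t := by
  unfold pvNextAfter pvN
  rw [pvMinPerm _ _ (hperm.filter (fun k => decide (k > t)))]

theorem pvLoop_main (u : Int → Int) (cap : Int) :
    ∀ (ts pre : List Int) (pen : Int), (pre ++ ts).Pairwise (· < ·) →
      (pvLoop u cap ts ((pre.map u).sum, pen)).2
        = pen + (ts.map (pvG u cap (pre ++ ts))).sum := by
  intro ts
  induction ts with
  | nil => intro pre pen _; simp [pvLoop]
  | cons t rest ih =>
    intro pre pen hpw
    have hsplit := List.pairwise_append.mp hpw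
    have hpret : ∀ p ∈ pre, p < t := fun p hp => hsplit.2.2 p hp t (by simp)
    have hrest : ∀ r ∈ rest, t < r := (List.pairwise_cons.mp hsplit.2.1).1
    have hS : pvS u (pre ++ t :: rest) t = (pre.map u).sum + u t := by
      unfold pvS
      rw [List.filter_append]
      have h1 : pre.filter (fun k => decide (k ≤ t)) = pre :=
        List.filter_eq_self.mpr (fun p hp => by simpa using le_of_lt (hpret p hp))
      have h2 : (t :: rest).filter (fun k => decide (k ≤ t)) = [t] := by
        simp only [List.filter_cons, decide_eq_true_eq, le_refl, if_pos]
        have : rest.filter (fun k => decide (k ≤ t)) = [] :=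
          List.filter_eq_nil_iff.mpr (fun r hr => by simpa using not_le.mpr (hrest r hr))
        simp [this]
      rw [h1, h2]
      simp
    have hN : pvN (pre ++ t :: rest) t = pvNext t rest := by
      unfold pvN
      have h1 : pre.filter (fun k => decide (k > t)) = [] :=
        List.filter_eq_nil_iff.mpr (fun p hp => by simpa using not_lt.mpr (le_of_lt (hpret p hp)))
      have h2 : rest.filter (fun k => decide (k > t)) = rest :=
        List.filter_eq_self.mpr (fun r hr => by simpa using hrest r hr)
      have hfilt : (pre ++ t :: rest).filter (fun k => decide (k > t)) = rest := by
        rw [List.filter_append, h1, List.nil_append, List.filter_cons]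
        simp [h2]
      rw [hfilt]
      cases rest with
      | nil =>
        have : PySem.List.min? ([] : List Int) (fun x => x) = none :=
          (PySem.List.min?_eq_none_iff ([] : List Int) (fun x => x)).mpr rfl
        simp [this, pvNext]
      | cons r rs =>
        rw [PySem.List.min?_id_cons]
        have hr2 : ∀ x ∈ rs, r < x :=
          (List.pairwise_cons.mp (List.pairwise_cons.mp hsplit.2.1).2).1
        have : rs.foldl min r = r := pvFoldlMin rs r (fun x hx => le_of_lt (hr2 x hx))
        simp [this, pvNext]
    have hstep : pvLoop u cap (t :: rest) ((pre.map u).sum, pen)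
        = pvLoop u cap rest (((pre ++ [t]).map u).sum,
            if (pre.map u).sum + u t > cap then
              pen + ((pre.map u).sum + u t - cap) * (pvNext t rest - t)
            else pen) := by
      simp [pvLoop]
    rw [hstep]
    have hassoc : (pre ++ [t]) ++ rest = pre ++ t :: rest := by simp
    have hih := ih (pre ++ [t])
      (if (pre.map u).sum + u t > cap then
        pen + ((pre.map u).sum + u t - cap) * (pvNext t rest - t) else pen)
      (by rw [hassoc]; exact hpw)
    rw [hassoc] at hih
    rw [hih]
    simp only [List.map_cons, List.sum_cons]
    have hG : pvG u cap (pre ++ t :: rest) t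
        = if (pre.map u).sum + u t > cap then
            ((pre.map u).sum + u t - cap) * (pvNext t rest - t) else 0 := by
      unfold pvG
      rw [hS, hN]
    rw [hG]
    split <;> ring

-- ===== VERDICT (by name: the statement is the Claim_ definition above) =====
theorem total_penalty_on_violation_spec : Claim_equal_total_penalty_on_violation := by
  intro events_log energy_cap _
  unfold Spec_total_penalty_on_violation
  simp only [total_penalty_on_violation, total_penalty_on_violation_alt]
  set d := PySem.Dict.ofList events_log with hd
  have hnd : d.keys.Nodup := PySem.Dict.nodup_keys_ofList events_log
  set ts := PySem.List.sorted d.keys (fun k => k) false with hts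
  have hperm : d.keys.Perm ts := (PySem.List.sorted_perm d.keys (fun k => k) false).symm
  have hpw : ts.Pairwise (· < ·) := by
    have h1 : ts.Pairwise (· ≤ ·) := PySem.List.sorted_pairwise d.keys (fun k => k)
    have h2 : ts.Nodup := hperm.nodup hnd
    exact (h1.and h2).imp (fun h => lt_of_le_of_ne h.1 h.2)
  -- A side
  rw [pvA_eq_loop (fun k => d.getD k 0) energy_cap ts (0, 0)]
  have hA := pvLoop_main (fun k => d.getD k 0) energy_cap ts [] 0 (by simpa using hpw)
  simp only [List.map_nil, List.sum_nil, List.nil_append, zero_add] at hA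
  rw [hA]
  -- B side
  have hB1 : d.keys.foldl (fun penalty t =>
      if pvCumLE d t > energy_cap then
        penalty + (pvCumLE d t - energy_cap) * (pvNextAfter d t - t)
      else penalty) 0
      = d.keys.foldl (fun penalty t => penalty +
          (if pvCumLE d t > energy_cap then
            (pvCumLE d t - energy_cap) * (pvNextAfter d t - t) else 0)) 0 := by
    apply List.foldl_ext
    intro pen t _
    split <;> simp
  rw [hB1, pvFoldlAdd]
  have hmap : d.keys.map (fun t =>
      if pvCumLE d t > energy_cap then
        (pvCumLE d t - energy_cap) * (pvNextAfter d t - t) else 0)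
      = d.keys.map (pvG (fun k => d.getD k 0) energy_cap ts) := by
    apply List.map_congr_left
    intro t _
    rw [pvCumLE_eq d hnd ts hperm t, pvNextAfter_eq d ts hperm t]
    rfl
  rw [hmap, (hperm.map (pvG (fun k => d.getD k 0) energy_cap ts)).sum_eq]
  simp
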